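-- pv_equiv track=rewrite | github.com/SandersNeo/AISecurity | strike/evasion/payload_mutator.py | prime_obfuscate
-- ===== SOURCE A (Python) =====
-- def prime_obfuscate(payload: str) -> str:
--     """
--     Prime number obfuscation.
--
--     Transform characters at prime positions using prime-based encoding.
--     """
--     def is_prime(n):
--         if n < 2:
--             return False
--         for i in range(2, int(n ** 0.5) + 1):
--             if n % i == 0:
--                 return False
--         return True
--
--     result = []
--     for i, c in enumerate(payload):
--         if is_prime(i) and c.isalpha():
--             # Shift by next prime
--             shift = 2 if i < 5 else 3
--             if c.isupper():
--                 shifted = chr((ord(c) - 65 + shift) % 26 + 65)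
--             else:
--                 shifted = chr((ord(c) - 97 + shift) % 26 + 97)
--             result.append(shifted)
--         else:
--             result.append(c)
--
--     return ''.join(result)
-- ===== SOURCE B (Python) =====
-- def prime_obfuscate(payload: str) -> str:
--     """Prime obfuscation via a Sieve of Eratosthenes: precompute primality of
--     every position once, then a single transformation pass."""
--     n = len(payload)
--     sieve = [i >= 2 for i in range(n)]
--     for p in range(2, n):
--         if sieve[p]:
--             for m in range(2 * p, n, p):
--                 sieve[m] = False
--
--     def shift_char(i, c):
--         shift = 2 if i < 5 else 3
--         base = 65 if c.isupper() else 97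
--         return chr((ord(c) - base + shift) % 26 + base)
--
--     return ''.join(
--         shift_char(i, c) if sieve[i] and c.isalpha() else c
--         for i, c in enumerate(payload)
--     )
-- ===== Notes on version B (the rewrite author's own statement) =====
-- stated objective: faster
-- what changed: Replaced per-position trial-division primality testing with a Sieve of Eratosthenes computed once over all positions, and a single map pass over the characters.
import Mathlib
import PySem

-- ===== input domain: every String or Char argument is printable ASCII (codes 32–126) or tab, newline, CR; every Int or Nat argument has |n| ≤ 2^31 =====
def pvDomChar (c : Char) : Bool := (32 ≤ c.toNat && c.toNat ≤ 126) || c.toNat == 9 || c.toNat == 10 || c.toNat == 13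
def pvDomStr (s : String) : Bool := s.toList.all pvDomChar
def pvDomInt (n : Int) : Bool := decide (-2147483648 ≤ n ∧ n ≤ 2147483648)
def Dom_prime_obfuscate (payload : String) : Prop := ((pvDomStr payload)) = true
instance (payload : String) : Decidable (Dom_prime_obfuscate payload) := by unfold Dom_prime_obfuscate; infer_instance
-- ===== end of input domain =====

-- B replaces A's per-position trial-division primality test by a Sieve of Eratosthenes
-- computed once, then one transformation pass (objective: faster, asymptotically).

-- ===== PORT A =====
-- is_prime: trial division over range(2, int(n**0.5)+1); int(n**0.5) = Nat.sqrt n,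
-- exact for every position index reachable here (enumerate indices are nonnegative).
def pvIsPrimeA (n : Int) : Bool :=
  if n < 2 then false
  else
    let m := n.toNat
    (List.range' 2 (Nat.sqrt m + 1 - 2)).all (fun i => !(m % i == 0))

-- the shifted character, A's branch structure (upper branch / lower branch);
-- ord(c)-65 (resp. -97) is nonnegative for the upper (resp. lower) ASCII letters reaching it
def pvShiftA (i : Int) (c : Char) : Char :=
  let shift : Nat := if i < 5 then 2 else 3
  if PySem.Chars.isupper c then Char.ofNat ((c.toNat - 65 + shift) % 26 + 65)
  else Char.ofNat ((c.toNat - 97 + shift) % 26 + 97)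

def prime_obfuscate (payload : String) : String :=
  let result := (PySem.List.enumerate payload.toList).foldl
    (fun acc ic =>
      if pvIsPrimeA ic.1 && PySem.Chars.isalpha ic.2 then acc ++ [pvShiftA ic.1 ic.2]
      else acc ++ [ic.2]) []
  String.mk result

-- ===== PORT B =====
-- Sieve of Eratosthenes over the n positions; range(2*p, n, p) has
-- (n - 2*p + p - 1) / p elements (Nat subtraction: 0 when 2*p ≥ n).
def pvSieve (n : Nat) : List Bool :=
  let s0 := (List.range n).map (fun i => decide (2 ≤ i))
  (List.range' 2 (n - 2)).foldl
    (fun s p =>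
      if s.getD p false then
        (List.range' (2 * p) ((n - 2 * p + p - 1) / p) p).foldl
          (fun s m => s.set m false) s
      else s) s0

-- B's shift_char: pick the base first, one chr
def pvShiftB (i : Int) (c : Char) : Char :=
  let shift : Nat := if i < 5 then 2 else 3
  let base : Nat := if PySem.Chars.isupper c then 65 else 97
  Char.ofNat ((c.toNat - base + shift) % 26 + base)

def prime_obfuscate_alt (payload : String) : String :=
  let cs := payload.toList
  let sieve := pvSieve cs.length
  String.mk ((PySem.List.enumerate cs).map
    (fun ic =>
      if sieve.getD ic.1.toNat false && PySem.Chars.isalpha ic.2 then pvShiftB ic.1 ic.2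
      else ic.2))

-- ===== PRECONDITION & SPEC =====
def Spec_prime_obfuscate (payload : String) (out : String) : Prop := out = prime_obfuscate_alt payload
instance (payload : String) (out : String) : Decidable (Spec_prime_obfuscate payload out) := by unfold Spec_prime_obfuscate; infer_instance

-- ===== CLAIM (what is proved, stated in full; the proofs are below) =====
def Claim_equal_prime_obfuscate : Prop := ∀ (payload : String), Dom_prime_obfuscate payload → Spec_prime_obfuscate payload (prime_obfuscate payload)

-- ===== LEMMAS AND PROOFS =====

theorem pvIsPrimeA_eq (m : Nat) : pvIsPrimeA (m : Int) = decide (Nat.Prime m) := by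
  unfold pvIsPrimeA
  by_cases h : (m : Int) < 2
  · have hm : m < 2 := by omega
    have : ¬ Nat.Prime m := by interval_cases m <;> decide
    simp [h, this]
  · have hm : 2 ≤ m := by omega
    rw [if_neg h]
    simp only [Int.toNat_natCast]
    have h1 : Nat.sqrt m ≥ 1 := by
      have := Nat.sqrt_le_sqrt (show 1 ≤ m by omega)
      simpa using this
    rcases Bool.eq_false_or_eq_true ((List.range' 2 (Nat.sqrt m + 1 - 2)).all (fun i => !(m % i == 0))) with hb | hb
    · rw [hb]
      symm
      rw [decide_eq_true_eq]
      rw [List.all_eq_true] at hb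
      rw [Nat.prime_def_le_sqrt]
      refine ⟨hm, fun d hd2 hdle hdvd => ?_⟩
      have := hb d (by rw [List.mem_range'_1]; omega)
      simp only [Bool.not_eq_true', beq_eq_false_iff_ne, ne_eq] at this
      exact this (Nat.mod_eq_zero_of_dvd hdvd)
    · rw [hb]
      symm
      rw [decide_eq_false_iff_not]
      rw [List.all_eq_false] at hb
      rcases hb with ⟨i, hi, hval⟩
      rw [List.mem_range'_1] at hi
      intro hp
      have hdvd : i ∣ m := by
        simp at hval
        exact Nat.dvd_of_mod_eq_zero hval
      exact (Nat.prime_def_le_sqrt.mp hp).2 i (by omega) (by omega) hdvd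

def pvGood (b i : Nat) : Prop := 2 ≤ i ∧ ∀ d, 2 ≤ d → d < b → d ∣ i → d = i

-- marking pass: length preserved, and pointwise effect
theorem pvMark_length (l : List Nat) (s : List Bool) :
    (l.foldl (fun s m => s.set m false) s).length = s.length := by
  induction l generalizing s with
  | nil => rfl
  | cons m l ih => simp [List.foldl_cons, ih, List.length_set]

theorem pvMark_getD (l : List Nat) (s : List Bool) (i : Nat) (hi : i < s.length) :
    (l.foldl (fun s m => s.set m false) s).getD i false
      = if i ∈ l then false else s.getD i false := by
  induction l generalizing s with
  | nil => simp
  | cons m l ih =>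
    rw [List.foldl_cons, ih _ (by simp [hi])]
    by_cases hm : i = m
    · subst hm
      simp only [List.mem_cons, true_or, if_true]
      by_cases hil : i ∈ l
      · simp [hil]
      · simp [hil, List.getD_eq_getElem?_getD, List.getElem?_set, hi]
    · simp only [List.mem_cons]
      by_cases hil : i ∈ l
      · simp [hil, hm]
      · simp [hil, hm, List.getD_eq_getElem?_getD, List.getElem?_set, Ne.symm hm]

-- range(2*p, n, p) contains exactly the proper multiples of p below n
theorem pvMem_multiples (p n i : Nat) (hp : 1 ≤ p) :
    i ∈ List.range' (2 * p) ((n - 2 * p + p - 1) / p) p ↔ p ∣ i ∧ 2 * p ≤ i ∧ i < n := by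
  rw [List.mem_range']
  constructor
  · rintro ⟨j, hj, rfl⟩
    have hj' : (j + 1) * p ≤ n - 2 * p + p - 1 := (Nat.le_div_iff_mul_le hp).mp hj
    have h2 : (j + 1) * p = p * j + p := by ring
    refine ⟨⟨2 + j, by ring⟩, by omega, ?_⟩
    generalize p * j = t at *
    omega
  · rintro ⟨⟨k, rfl⟩, h2p, hn⟩
    have hk2 : 2 ≤ k := by
      by_contra hk
      interval_cases k <;> omega
    refine ⟨k - 2, ?_, ?_⟩
    · rw [Nat.lt_iff_add_one_le, Nat.le_div_iff_mul_le hp]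
      have h3 : (k - 2 + 1) * p = p * k - p := by
        have : k - 2 + 1 = k - 1 := by omega
        rw [this, Nat.sub_mul, Nat.one_mul, Nat.mul_comm]
      rw [h3]
      generalize p * k = t at *
      omega
    · have h4 : p * (k - 2) = p * k - 2 * p := by
        rw [Nat.mul_sub]
        ring_nf
      rw [h4]
      generalize p * k = t at *
      omega

theorem pvS0_getD (n i : Nat) (hi : i < n) :
    (((List.range n).map (fun i => decide (2 ≤ i))).getD i false) = decide (2 ≤ i) := by
  simp [List.getD_eq_getElem?_getD, List.getElem?_map, List.getElem?_range, hi]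

theorem pvSieve_inv (n : Nat) (k : Nat) (hk : 2 + k ≤ n) :
    ((List.range' 2 k).foldl
      (fun s p =>
        if s.getD p false then
          (List.range' (2 * p) ((n - 2 * p + p - 1) / p) p).foldl
            (fun s m => s.set m false) s
        else s) ((List.range n).map (fun i => decide (2 ≤ i)))).length = n ∧
    ∀ i, i < n →
      (((List.range' 2 k).foldl
        (fun s p =>
          if s.getD p false then
            (List.range' (2 * p) ((n - 2 * p + p - 1) / p) p).foldl
              (fun s m => s.set m false) s
          else s) ((List.range n).map (fun i => decide (2 ≤ i)))).getD i false = true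
        ↔ pvGood (2 + k) i) := by
  induction k with
  | zero =>
    refine ⟨by simp, fun i hi => ?_⟩
    simp only [List.range'_zero, List.foldl_nil]
    rw [pvS0_getD n i hi]
    unfold pvGood
    constructor
    · intro h
      exact ⟨by simpa using h, fun d hd2 hdb _ => by omega⟩
    · intro ⟨h, _⟩
      simpa using h
  | succ k ih =>
    have ih' := ih (by omega)
    obtain ⟨hlen, hinv⟩ := ih'
    set s := (List.range' 2 k).foldl
      (fun s p =>
        if s.getD p false then
          (List.range' (2 * p) ((n - 2 * p + p - 1) / p) p).foldl
            (fun s m => s.set m false) s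
        else s) ((List.range n).map (fun i => decide (2 ≤ i))) with hs
    set p := 2 + k with hpdef
    have hpn : p < n := by omega
    have hp2 : 2 ≤ p := by omega
    rw [List.range'_concat]
    rw [List.foldl_append]
    rw [← hs]
    simp only [List.foldl_cons, List.foldl_nil, Nat.mul_one]
    have hstep : (2 : Nat) + 1 * k = p := by omega
    rw [hstep]
    by_cases hsp : s.getD p false = true
    · rw [if_pos hsp]
      constructor
      · rw [pvMark_length, hlen]
      · intro i hi
        rw [pvMark_getD _ _ _ (by rw [hlen]; exact hi)]
        simp only [pvMem_multiples p n i (show 1 ≤ p by omega)]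
        by_cases hmem : p ∣ i ∧ 2 * p ≤ i ∧ i < n
        · rw [if_pos hmem]
          obtain ⟨hdvd, h2p, _⟩ := hmem
          constructor
          · intro h; exact absurd h (by simp)
          · intro ⟨hi2, hall⟩
            have := hall p hp2 (by omega) hdvd
            omega
        · rw [if_neg hmem, hinv i hi]
          unfold pvGood
          constructor
          · intro ⟨hi2, hall⟩
            refine ⟨hi2, fun d hd2 hdb hdvd => ?_⟩
            by_cases hdp : d = p
            · subst hdp
              -- p ∣ i but i is not a proper multiple: i < 2*p, hence i = p
              have hnle : ¬ 2 * p ≤ i := by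
                intro hle
                exact hmem ⟨hdvd, hle, hi⟩
              obtain ⟨c, rfl⟩ := hdvd
              have hc1 : c = 1 := by
                rcases Nat.eq_zero_or_pos c with hc | hc
                · subst hc; omega
                · by_contra hne
                  have : 2 ≤ c := by omega
                  have : 2 * p ≤ p * c := by nlinarith
                  omega
              subst hc1; omega
            · exact hall d hd2 (by omega) hdvd
          · intro ⟨hi2, hall⟩
            exact ⟨hi2, fun d hd2 hdb hdvd => hall d hd2 (by omega) hdvd⟩
    · rw [if_neg hsp]
      refine ⟨hlen, fun i hi => ?_⟩
      rw [hinv i hi]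
      have hnotgood : ¬ pvGood p p := by
        intro hg
        exact hsp ((hinv p hpn).mpr hg)
      unfold pvGood at hnotgood ⊢
      push_neg at hnotgood
      constructor
      · intro ⟨hi2, hall⟩
        refine ⟨hi2, fun d hd2 hdb hdvd => ?_⟩
        by_cases hdp : d = p
        · subst hdp
          obtain ⟨e, he2, hep, hedvd, hene⟩ := hnotgood hp2
          have hei : e ∣ i := hedvd.trans hdvd
          have := hall e he2 (by omega) hei
          have hpi : p ≤ i := Nat.le_of_dvd (by omega) hdvd
          omega
        · exact hall d hd2 (by omega) hdvd
      · intro ⟨hi2, hall⟩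
        exact ⟨hi2, fun d hd2 hdb hdvd => hall d hd2 (by omega) hdvd⟩

theorem pvGood_iff_prime (n i : Nat) (hi : i < n) : pvGood n i ↔ Nat.Prime i := by
  unfold pvGood
  constructor
  · intro ⟨hi2, hall⟩
    rw [Nat.prime_def_lt']
    refine ⟨hi2, fun m hm2 hmi hdvd => ?_⟩
    have := hall m hm2 (by omega) hdvd
    omega
  · intro hp
    refine ⟨hp.two_le, fun d hd2 _ hdvd => ?_⟩
    rcases (Nat.Prime.eq_one_or_self_of_dvd hp d hdvd) with h | h
    · omega
    · exact h

theorem pvSieve_getD (n i : Nat) (hi : i < n) :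
    (pvSieve n).getD i false = decide (Nat.Prime i) := by
  unfold pvSieve
  by_cases hn : n < 2
  · have hr : n - 2 = 0 := by omega
    rw [hr]
    simp only [List.range'_zero, List.foldl_nil]
    rw [pvS0_getD n i hi]
    have : ¬ Nat.Prime i := by
      have : i < 2 := by omega
      interval_cases i <;> decide
    simp [this]
    omega
  · have hk : 2 + (n - 2) ≤ n := by omega
    obtain ⟨_, hinv⟩ := pvSieve_inv n (n - 2) hk
    have h1 := hinv i hi
    have h2 : 2 + (n - 2) = n := by omega
    rw [h2] at h1
    rw [pvGood_iff_prime n i hi] at h1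
    by_cases hp : Nat.Prime i
    · rw [decide_eq_true hp]
      exact h1.mpr hp
    · simp only [hp, decide_false]
      rw [← Bool.not_eq_true]
      intro hc
      exact hp (h1.mp hc)

-- the two shifted characters agree
theorem pvShift_eq (i : Int) (c : Char) : pvShiftA i c = pvShiftB i c := by
  unfold pvShiftA pvShiftB
  by_cases h : PySem.Chars.isupper c = true <;> simp [h]

-- A's append-fold builds the mapped list
theorem foldl_if_push {α β : Type} (q : α → Bool) (f g : α → β) :
    ∀ (xs : List α) (l : List β),
      xs.foldl (fun acc x => if q x then acc ++ [f x] else acc ++ [g x]) l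
        = l ++ xs.map (fun x => if q x then f x else g x) := by
  intro xs
  induction xs with
  | nil => intro l; simp
  | cons x xs ih =>
    intro l
    by_cases h : q x = true <;> simp [List.foldl_cons, h, ih]

-- ===== VERDICT (by name: the statement is the Claim_ definition above) =====
theorem prime_obfuscate_spec : Claim_equal_prime_obfuscate := by
  intro payload _
  unfold Spec_prime_obfuscate prime_obfuscate prime_obfuscate_alt
  simp only []
  rw [foldl_if_push]
  simp only [List.nil_append]
  congr 1
  apply List.map_congr_left
  intro ic hic
  rcases (PySem.List.mem_enumerate_iff _ _ _).mp hic with ⟨k, hk, rfl⟩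
  simp only []
  have h1 : pvIsPrimeA ((0 : Int) + k) = (pvSieve payload.toList.length).getD ((0 : Int) + (k : Int)).toNat false := by
    have : ((0 : Int) + (k : Int)).toNat = k := by omega
    rw [this]
    show pvIsPrimeA ((0 : Int) + k) = _
    rw [pvSieve_getD _ _ hk]
    have : ((0 : Int) + (k : Int)) = (k : Int) := by omega
    rw [this, pvIsPrimeA_eq]
  rw [h1, pvShift_eq]
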